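-- pv_equiv track=rewrite | github.com/SwiftWare-Lab/typed-data-transformation | modeling/string_float.py | decompose_strings
-- ===== SOURCE A (Python) =====
-- def decompose_strings(ds):
--     b0, b1, b2, b3 = [], [], [], []
--     len_m4 = (len(ds) - len(ds) % 4)
--     for i in range(0, len_m4, 4):
--         b0.append(ds[i+0])
--         b1.append(ds[i+1])
--         b2.append(ds[i+2])
--         b3.append(ds[i+3])
--     return b0, b1, b2, b3
-- ===== SOURCE B (Python) =====
-- def decompose_strings(ds):
--     len_m4 = len(ds) - len(ds) % 4
--     return (list(ds[0:len_m4:4]), list(ds[1:len_m4:4]),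
--             list(ds[2:len_m4:4]), list(ds[3:len_m4:4]))
-- ===== Notes on version B (the rewrite author's own statement) =====
-- stated objective: idiomatic
-- what changed: Replaced the single index loop that appends to four accumulators with four independent strided slices ds[j:len_m4:4] over the truncated prefix.
import Mathlib
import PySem

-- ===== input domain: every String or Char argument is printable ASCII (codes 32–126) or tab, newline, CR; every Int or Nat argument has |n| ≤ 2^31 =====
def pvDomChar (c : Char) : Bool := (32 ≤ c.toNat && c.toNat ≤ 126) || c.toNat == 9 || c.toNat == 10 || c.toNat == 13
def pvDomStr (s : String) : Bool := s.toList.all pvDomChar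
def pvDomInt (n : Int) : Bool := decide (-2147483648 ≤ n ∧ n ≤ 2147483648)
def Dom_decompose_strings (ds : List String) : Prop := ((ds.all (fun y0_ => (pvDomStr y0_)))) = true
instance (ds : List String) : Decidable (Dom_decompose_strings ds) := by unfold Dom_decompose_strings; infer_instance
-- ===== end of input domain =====

-- B replaces A's single index loop (which appends to four accumulators) by four
-- independent strided slices over the truncated prefix; same cost, more idiomatic.


-- ===== PORT A =====
-- ds[i+j] is ported with pyGetD: every index the loop touches is < len(ds), so
-- Python never raises and the default is never returned (value-exact on all inputs).
def decompose_strings (ds : List String) : List String × List String × List String × List String :=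
  let len_m4 : Int := (ds.length : Int) - PySem.Int.mod (ds.length : Int) 4
  (PySem.List.pyRange 0 len_m4 4).foldl
    (fun (acc : List String × List String × List String × List String) i =>
      (acc.1       ++ [PySem.List.pyGetD ds (i + 0) ""],
       acc.2.1     ++ [PySem.List.pyGetD ds (i + 1) ""],
       acc.2.2.1   ++ [PySem.List.pyGetD ds (i + 2) ""],
       acc.2.2.2   ++ [PySem.List.pyGetD ds (i + 3) ""]))
    ([], [], [], [])

-- ===== PORT B =====
-- ds[a:len_m4:4] is slice?; the step is 4 ≠ 0 so slice? is always some and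
-- the .getD [] default is never returned (value-exact on all inputs).
def decompose_strings_alt (ds : List String) : List String × List String × List String × List String :=
  let len_m4 : Int := (ds.length : Int) - PySem.Int.mod (ds.length : Int) 4
  ((PySem.List.slice? ds (some 0) (some len_m4) 4).getD [],
   (PySem.List.slice? ds (some 1) (some len_m4) 4).getD [],
   (PySem.List.slice? ds (some 2) (some len_m4) 4).getD [],
   (PySem.List.slice? ds (some 3) (some len_m4) 4).getD [])

-- ===== PRECONDITION & SPEC =====
def Spec_decompose_strings (ds : List String) (out : List String × List String × List String × List String) : Prop := out = decompose_strings_alt ds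
instance (ds : List String) (out : List String × List String × List String × List String) : Decidable (Spec_decompose_strings ds out) := by unfold Spec_decompose_strings; infer_instance

-- ===== CLAIM (what is proved, stated in full; the proofs are below) =====
def Claim_equal_decompose_strings : Prop := ∀ (ds : List String), Dom_decompose_strings ds → Spec_decompose_strings ds (decompose_strings ds)

-- ===== LEMMAS AND PROOFS =====

-- A's loop over the range fills the four accumulators with four maps.
theorem foldl4_append (f0 f1 f2 f3 : Int → String) (l : List Int)
    (a0 a1 a2 a3 : List String) :
    l.foldl
      (fun (acc : List String × List String × List String × List String) i =>
        (acc.1 ++ [f0 i], acc.2.1 ++ [f1 i], acc.2.2.1 ++ [f2 i], acc.2.2.2 ++ [f3 i]))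
      (a0, a1, a2, a3)
    = (a0 ++ l.map f0, a1 ++ l.map f1, a2 ++ l.map f2, a3 ++ l.map f3) := by
  induction l generalizing a0 a1 a2 a3 with
  | nil => simp
  | cons x xs ih => simp [List.foldl_cons, ih]

-- the truncated length, as a Nat: len - len % 4 = 4 * (len / 4)
theorem len_m4_eq (n : Nat) :
    (n : Int) - PySem.Int.mod (n : Int) 4 = ((4 * (n / 4) : Nat) : Int) := by
  rw [PySem.Int.mod_eq_emod_of_pos (by norm_num : (0:Int) < 4)]
  push_cast
  omega

-- B's strided slice with start j < 4 and stop 4*q ≤ len: a map over range q.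
theorem slice_stride (ds : List String) (j q : Nat) (hj : j < 4)
    (hq : 4 * q ≤ ds.length) :
    (PySem.List.slice? ds (some (j : Int)) (some ((4 * q : Nat) : Int)) 4).getD []
    = (List.range q).map (fun k => ds.getD (j + 4 * k) "") := by
  simp only [PySem.List.slice?, PySem.List.sliceIndices,
    if_neg (show ¬((4:Int) = 0) by norm_num), if_neg (show ¬((4:Int) < 0) by norm_num),
    if_pos (show (0:Int) < 4 by norm_num),
    if_neg (show ¬((j:Int) < 0) by omega),
    if_neg (show ¬(((4 * q : Nat) : Int) < 0) by omega)]
  have hstop : min ((4 * q : Nat) : Int) ((ds.length : Nat) : Int) = ((4 * q : Nat) : Int) := by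
    rw [min_eq_left]; exact_mod_cast hq
  rw [hstop]
  rcases Nat.eq_zero_or_pos q with h0 | hpos
  · subst h0
    have hnlt : ¬ (min ((j : Int)) ((ds.length : Nat) : Int) < ((4 * 0 : Nat) : Int)) := by
      have : (0:Int) ≤ min (j:Int) (ds.length:Int) := le_min (by omega) (by omega)
      push_cast
      omega
    rw [if_neg hnlt]
    simp
  · have hlen : 4 ≤ ds.length := by omega
    have hmin : min ((j : Int)) ((ds.length : Nat) : Int) = (j : Int) := by
      rw [min_eq_left]; exact_mod_cast (by omega : j ≤ ds.length)
    rw [hmin]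
    have hlt : (j : Int) < ((4 * q : Nat) : Int) := by push_cast; omega
    rw [if_pos hlt]
    have hcount : ((((4 * q : Nat) : Int) - (j : Int) + 4 - 1) / 4).toNat = q := by
      push_cast; omega
    rw [hcount]
    have hpt : ∀ k ∈ List.range q,
        ds[(((j : Int) + 4 * (k : Int)).toNat)]? = some (ds.getD (j + 4 * k) "") := by
      intro k hk
      rw [List.mem_range] at hk
      have hnat : ((j : Int) + 4 * (k : Int)).toNat = j + 4 * k := by omega
      have hidx : j + 4 * k < ds.length := by omega
      rw [hnat, List.getElem?_eq_getElem hidx, List.getD_eq_getElem _ _ hidx]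
    rw [List.filterMap_congr hpt]
    simp

-- A's range of indices is the strided map over range (len/4).
theorem range_A (q : Nat) :
    PySem.List.pyRange 0 ((4 * q : Nat) : Int) 4
    = (List.range q).map (fun k => ((4 * k : Nat) : Int)) := by
  rw [PySem.List.pyRange_of_pos 0 _ (by norm_num)]
  have hm : (if (0:Int) < ((4 * q : Nat) : Int)
      then ((((4 * q : Nat) : Int) - 0 + 4 - 1) / 4).toNat else 0) = q := by
    split_ifs with h
    · push_cast at h ⊢; omega
    · push_cast at h; omega
  rw [hm]
  refine List.map_congr_left fun k _ => ?_
  push_cast; ring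

-- pointwise agreement of the two index expressions
theorem pt_eq (ds : List String) (k j : Nat) :
    PySem.List.pyGetD ds (((4 * k : Nat) : Int) + (j : Int)) ""
    = ds.getD (j + 4 * k) "" := by
  have hc : ((4 * k : Nat) : Int) + (j : Int) = ((j + 4 * k : Nat) : Int) := by
    push_cast; ring
  rw [hc, PySem.List.pyGetD_natCast]

-- ===== VERDICT (by name: the statement is the Claim_ definition above) =====
theorem decompose_strings_spec : Claim_equal_decompose_strings := by
  intro ds _
  unfold Spec_decompose_strings decompose_strings decompose_strings_alt
  simp only []
  rw [len_m4_eq, range_A, foldl4_append]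
  have h0 := slice_stride ds 0 (ds.length / 4) (by omega) (by omega)
  have h1 := slice_stride ds 1 (ds.length / 4) (by omega) (by omega)
  have h2 := slice_stride ds 2 (ds.length / 4) (by omega) (by omega)
  have h3 := slice_stride ds 3 (ds.length / 4) (by omega) (by omega)
  simp only [Nat.cast_zero, Nat.cast_one, Nat.cast_ofNat] at h0 h1 h2 h3
  rw [h0, h1, h2, h3]
  refine Prod.ext ?_ (Prod.ext ?_ (Prod.ext ?_ ?_)) <;>
    simp only [List.map_map, List.nil_append] <;>
    refine List.map_congr_left fun k _ => ?_ <;>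
    simp only [Function.comp_apply]
  · simpa using pt_eq ds k 0
  · simpa using pt_eq ds k 1
  · simpa using pt_eq ds k 2
  · simpa using pt_eq ds k 3
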